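-- pv_equiv track=rewrite | github.com/krzsok/python-course | 12/moda_py.py | moda_py
-- ===== SOURCE A (Python) =====
-- def moda_py(L, left, right):
--   slist = L[left : right + 1]
--   occurences = {el:0 for el in slist}
--   for el in slist :
--     occurences[el] += 1
--
--   v=list(occurences.values())
--   k=list(occurences.keys())
--   return k[v.index(max(v))]
-- ===== SOURCE B (Python) =====
-- def moda_py(L, left, right):
--     slist = L[left : right + 1]
--     return max(slist, key=slist.count)
-- ===== Notes on version B (the rewrite author's own statement) =====
-- stated objective: idiomatic
-- what changed: Replaces the frequency dictionary plus keys/values/index bookkeeping with the one-liner max(slist, key=slist.count), relying on max's first-maximal tie-break to reproduce A's insertion-order choice.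
import Mathlib
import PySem

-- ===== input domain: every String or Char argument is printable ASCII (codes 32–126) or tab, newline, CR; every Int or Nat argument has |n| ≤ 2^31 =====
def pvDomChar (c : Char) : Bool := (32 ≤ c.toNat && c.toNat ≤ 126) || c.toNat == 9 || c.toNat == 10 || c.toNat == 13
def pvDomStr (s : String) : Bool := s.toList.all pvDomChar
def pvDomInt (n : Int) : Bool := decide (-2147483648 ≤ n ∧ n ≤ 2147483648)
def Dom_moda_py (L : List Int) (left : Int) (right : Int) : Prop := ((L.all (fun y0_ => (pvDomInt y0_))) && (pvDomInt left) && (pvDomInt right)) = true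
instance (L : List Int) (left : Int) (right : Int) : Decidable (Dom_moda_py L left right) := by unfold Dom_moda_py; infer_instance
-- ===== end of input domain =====

-- B replaces A's frequency-dictionary-plus-index bookkeeping with the idiomatic
-- max(slist, key=slist.count); same return value on every nonempty slice (both raise on an empty one).

-- ===== PORT A =====
def moda_py (L : List Int) (left : Int) (right : Int) : Int :=
  let slist := PySem.List.slice L (some left) (some (right + 1))
  let occ0 : PySem.Dict Int Int := slist.foldl (fun d el => d.insert el 0) PySem.Dict.empty
  -- 'occurences[el] += 1': the key is always present (seeded by the comprehension), so modify with default 0 is exact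
  let occ : PySem.Dict Int Int := slist.foldl (fun d el => d.modify el 0 (· + 1)) occ0
  let v := occ.values
  let k := occ.keys
  match PySem.List.max? v (fun x => x) with
  | none => 0      -- max([]) raises ValueError: excluded by Pre_
  | some mx =>
    match PySem.List.index? v mx with
    | none => 0    -- unreachable: mx ∈ v
    | some i => (PySem.List.pyGet? k ((i : Int))).getD 0

-- ===== PORT B =====
def moda_py_alt (L : List Int) (left : Int) (right : Int) : Int :=
  let slist := PySem.List.slice L (some left) (some (right + 1))
  match PySem.List.max? slist (fun el => (PySem.List.count slist el : Int)) with
  | none => 0      -- max([]) raises ValueError: excluded by Pre_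
  | some m => m

-- ===== PRECONDITION & SPEC =====
-- Pre_ excludes exactly the inputs where the slice L[left:right+1] is empty: there A raises
-- ValueError (max of empty sequence) and B raises the same ValueError.
def Pre_moda_py (L : List Int) (left : Int) (right : Int) : Prop :=
  PySem.List.slice L (some left) (some (right + 1)) ≠ []
instance (L : List Int) (left : Int) (right : Int) : Decidable (Pre_moda_py L left right) := by unfold Pre_moda_py; infer_instance
def pvWitness_moda_py : List Int × Int × Int := ([3, 1, 1, 2], 0, 3)

def Spec_moda_py (L : List Int) (left : Int) (right : Int) (out : Int) : Prop := out = moda_py_alt L left right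
instance (L : List Int) (left : Int) (right : Int) (out : Int) : Decidable (Spec_moda_py L left right out) := by unfold Spec_moda_py; infer_instance

-- ===== CLAIM (what is proved, stated in full; the proofs are below) =====
def Claim_equal_moda_py : Prop := ∀ (L : List Int) (left : Int) (right : Int), Dom_moda_py L left right → Pre_moda_py L left right → Spec_moda_py L left right (moda_py L left right)

-- ===== LEMMAS AND PROOFS =====

-- the foldl step of Python's max(xs, key=c)
def pvStep (c : Int → Int) (acc : Option Int) (x : Int) : Option Int :=
  match acc with
  | none => some x
  | some m => if c m < c x then some x else some m

theorem pvMax?_eq (l : List Int) (c : Int → Int) :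
    PySem.List.max? l c = l.foldl (pvStep c) none := by
  unfold PySem.List.max?
  congr 1
  funext acc x
  cases acc <;> rfl

-- dedup of l relative to an already-seen set t
def pvE (t : List Int) : List Int → List Int
  | [] => []
  | x :: l => if t.contains x then pvE t l else x :: pvE (t ++ [x]) l

theorem pvOfList_eq (l t : List Int) : List.foldl PySem.Set.add t l = t ++ pvE t l := by
  induction l generalizing t with
  | nil => simp [pvE]
  | cons x l ih =>
    simp only [List.foldl_cons, pvE, PySem.Set.add, PySem.Set.contains]
    by_cases h : List.contains t x = true
    · rw [if_pos h, if_pos h]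
      exact ih t
    · rw [if_neg h, if_neg h, ih (t ++ [x])]
      simp

theorem pvSome (c : Int → Int) (l : List Int) (a : Int) :
    ∃ m, l.foldl (pvStep c) (some a) = some m := by
  induction l generalizing a with
  | nil => exact ⟨a, rfl⟩
  | cons x l ih =>
    simp only [List.foldl_cons, pvStep]
    split_ifs <;> exact ih _

theorem pvSkip (c : Int → Int) (l t : List Int) (acc : Option Int)
    (h : ∀ x ∈ l, t.contains x = true → ∃ m, acc = some m ∧ c x ≤ c m) :
    l.foldl (pvStep c) acc = (pvE t l).foldl (pvStep c) acc := by
  induction l generalizing t acc with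
  | nil => rfl
  | cons x l ih =>
    by_cases hx : t.contains x
    · obtain ⟨m, hm, hle⟩ := h x (by simp) hx
      have hstep : pvStep c acc x = acc := by
        subst hm; simp [pvStep, not_lt_of_ge hle]
      simp only [pvE, hx, if_true, List.foldl_cons, hstep]
      exact ih t acc (fun y hy hty => h y (by simp [hy]) hty)
    · simp only [pvE, hx, Bool.false_eq_true, if_false, List.foldl_cons]
      apply ih (t ++ [x])
      intro y hy hty
      have hsome : ∃ m', pvStep c acc x = some m' ∧ c x ≤ c m' ∧
          (∀ m0, acc = some m0 → c m0 ≤ c m') := by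
        cases acc with
        | none => exact ⟨x, rfl, le_refl _, by simp⟩
        | some a =>
          simp only [pvStep]
          by_cases hca : c a < c x
          · exact ⟨x, by simp [hca], le_refl _, by intro m0 hm0; cases hm0; exact le_of_lt hca⟩
          · exact ⟨a, by simp [hca], le_of_not_gt hca, by intro m0 hm0; cases hm0; exact le_refl _⟩
      obtain ⟨m', hm', hxm', hmono⟩ := hsome
      rcases (by simpa using hty : t.contains y = true ∨ y = x) with hty' | rfl
      · obtain ⟨m, hm, hle⟩ := h y (by simp [hy]) hty'
        exact ⟨m', hm', le_trans hle (hmono m hm)⟩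
      · exact ⟨m', hm', hxm'⟩

theorem pvMap (c : Int → Int) (l : List Int) (acc : Option Int) :
    (l.map c).foldl (pvStep (fun x => x)) (acc.map c) = (l.foldl (pvStep c) acc).map c := by
  induction l generalizing acc with
  | nil => rfl
  | cons x l ih =>
    simp only [List.map_cons, List.foldl_cons]
    rw [← ih]
    congr 1
    cases acc with
    | none => rfl
    | some a => simp only [Option.map_some, pvStep]; split_ifs <;> rfl

theorem pvFirstMax (c : Int → Int) (l : List Int) (acc : Option Int) (m : Int)
    (h : l.foldl (pvStep c) acc = some m) :
    (acc = some m ∧ ∀ x ∈ l, c x ≤ c m) ∨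
    ∃ pre suf, l = pre ++ m :: suf ∧ (∀ x ∈ pre, c x < c m) ∧ (∀ x ∈ suf, c x ≤ c m) ∧
      (∀ m0, acc = some m0 → c m0 < c m) := by
  induction l generalizing acc with
  | nil => exact Or.inl ⟨h, by simp⟩
  | cons x l ih =>
    rcases ih (pvStep c acc x) h with ⟨hstep, hall⟩ | ⟨pre, suf, hdec, hpre, hsuf, hacc⟩
    · cases acc with
      | none =>
        cases hstep
        exact Or.inr ⟨[], l, by simp, by simp, hall, by simp⟩
      | some a =>
        by_cases hca : c a < c x
        · have hx : x = m := by simpa [pvStep, hca] using hstep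
          subst hx
          exact Or.inr ⟨[], l, by simp, by simp, hall, by intro m0 hm0; cases hm0; exact hca⟩
        · have ha : a = m := by simpa [pvStep, hca] using hstep
          subst ha
          refine Or.inl ⟨rfl, ?_⟩
          intro y hy
          rcases List.mem_cons.mp hy with rfl | hy'
          · exact le_of_not_gt hca
          · exact hall y hy'
    · cases acc with
      | none =>
        refine Or.inr ⟨x :: pre, suf, by simp [hdec], ?_, hsuf, by simp⟩
        intro y hy
        rcases List.mem_cons.mp hy with rfl | hy'
        · exact hacc y rfl
        · exact hpre y hy'
      | some a =>
        have hax : ∀ z, pvStep c (some a) x = some z → c z < c m := hacc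
        by_cases hca : c a < c x
        · have hx : c x < c m := hax x (by simp [pvStep, hca])
          refine Or.inr ⟨x :: pre, suf, by simp [hdec], ?_, hsuf, ?_⟩
          · intro y hy
            rcases List.mem_cons.mp hy with rfl | hy'
            · exact hx
            · exact hpre y hy'
          · intro m0 hm0; cases hm0; exact lt_trans hca hx
        · have ha : c a < c m := hax a (by simp [pvStep, hca])
          refine Or.inr ⟨x :: pre, suf, by simp [hdec], ?_, hsuf, ?_⟩
          · intro y hy
            rcases List.mem_cons.mp hy with rfl | hy'
            · exact lt_of_le_of_lt (le_of_not_gt hca) ha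
            · exact hpre y hy'
          · intro m0 hm0; cases hm0; exact ha

theorem pvGetD0 (l : List Int) (d : PySem.Dict Int Int) (h : ∀ y, d.getD y 0 = 0) (y : Int) :
    (l.foldl (fun d el => d.insert el 0) d).getD y 0 = 0 := by
  induction l generalizing d with
  | nil => exact h y
  | cons x l ih =>
    simp only [List.foldl_cons]
    exact ih _ (fun z => by rw [PySem.Dict.getD_insert]; split_ifs <;> simp [h])

theorem pvUpdate_self (l t : List Int) (h : ∀ x ∈ l, x ∈ t) :
    List.foldl PySem.Set.add t l = t := by
  induction l with
  | nil => rfl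
  | cons x l ih =>
    simp only [List.foldl_cons, PySem.Set.add, PySem.Set.contains]
    rw [if_pos (by simpa using h x (by simp))]
    exact ih (fun y hy => h y (by simp [hy]))

-- the whole equivalence, over an arbitrary nonempty slice s
theorem pvMain (s : List Int) (c : Int → Int) (hcdef : ∀ x, c x = (List.count x s : Int))
    (hne : s ≠ []) :
    (match PySem.List.max?
        ((List.foldl (fun d el => PySem.Dict.modify d el 0 (· + 1))
          (List.foldl (fun d el => PySem.Dict.insert d el 0) (PySem.Dict.empty : PySem.Dict Int Int) s) s).values)
        (fun x => x) with
      | none => 0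
      | some mx =>
        match PySem.List.index?
            ((List.foldl (fun d el => PySem.Dict.modify d el 0 (· + 1))
              (List.foldl (fun d el => PySem.Dict.insert d el 0) (PySem.Dict.empty : PySem.Dict Int Int) s) s).values) mx with
        | none => 0
        | some i => (PySem.List.pyGet?
            ((List.foldl (fun d el => PySem.Dict.modify d el 0 (· + 1))
              (List.foldl (fun d el => PySem.Dict.insert d el 0) (PySem.Dict.empty : PySem.Dict Int Int) s) s).keys)
            ((i : Int))).getD 0)
    = (match PySem.List.max? s (fun el => (PySem.List.count s el : Int)) with
      | none => 0
      | some m => m) := by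
  -- B's value
  obtain ⟨x0, rest, hsx⟩ := List.exists_cons_of_ne_nil hne
  obtain ⟨m, hB⟩ : ∃ m, s.foldl (pvStep c) none = some m := by
    rw [hsx]; exact pvSome c rest x0
  have hBmax : PySem.List.max? s (fun el => (PySem.List.count s el : Int)) = some m := by
    rw [pvMax?_eq]
    rw [show (fun el => ((PySem.List.count s el : Nat) : Int)) = c from
      funext fun el => by rw [hcdef, PySem.List.count_eq]]
    exact hB
  -- A's dict: keys, nodup, lookups, values
  have hkeys : (List.foldl (fun d el => PySem.Dict.modify d el 0 (· + 1))
      (List.foldl (fun d el => PySem.Dict.insert d el 0) (PySem.Dict.empty : PySem.Dict Int Int) s) s).keys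
      = PySem.Set.ofList s := by
    rw [PySem.Dict.keys_foldl_modify s 0 (fun _ _ v => v + 1),
        PySem.Dict.keys_foldl_insert s (fun _ _ => 0), PySem.Dict.keys_empty]
    show List.foldl PySem.Set.add (List.foldl PySem.Set.add [] s) s = PySem.Set.ofList s
    rw [← PySem.Set.ofList_eq_foldl]
    exact pvUpdate_self s _ (fun x hx => (PySem.Set.mem_ofList s x).mpr hx)
  have hnodup : (List.foldl (fun d el => PySem.Dict.modify d el 0 (· + 1))
      (List.foldl (fun d el => PySem.Dict.insert d el 0) (PySem.Dict.empty : PySem.Dict Int Int) s) s).keys.Nodup := by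
    apply PySem.Dict.nodup_keys_foldl_modify_key s (fun x => x) 0 (fun _ _ v => v + 1)
    apply PySem.Dict.nodup_keys_foldl_insert s (fun _ _ => 0)
    simp [PySem.Dict.keys_empty]
  have hgetD : ∀ y, (List.foldl (fun d el => PySem.Dict.modify d el 0 (· + 1))
      (List.foldl (fun d el => PySem.Dict.insert d el 0) (PySem.Dict.empty : PySem.Dict Int Int) s) s).getD y 0 = c y := by
    intro y
    rw [PySem.Dict.getD_foldl_modify_add_one,
        pvGetD0 s PySem.Dict.empty (fun z => PySem.Dict.getD_empty z 0) y, hcdef]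
    simp
  have hvals : (List.foldl (fun d el => PySem.Dict.modify d el 0 (· + 1))
      (List.foldl (fun d el => PySem.Dict.insert d el 0) (PySem.Dict.empty : PySem.Dict Int Int) s) s).values
      = (PySem.Set.ofList s).map c := by
    rw [PySem.Dict.values_eq_map_keys _ hnodup 0, hkeys]
    exact List.map_congr_left (fun y _ => hgetD y)
  -- first-max decomposition of the dedup list
  have hofE : PySem.Set.ofList s = pvE [] s := by
    rw [PySem.Set.ofList_eq_foldl, pvOfList_eq]
    simp
  have hskip : (PySem.Set.ofList s).foldl (pvStep c) none = some m := by
    rw [hofE, ← pvSkip c s [] none (by intro x hx hcon; simp at hcon)]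
    exact hB
  rcases pvFirstMax c (PySem.Set.ofList s) none m hskip with ⟨h1, _⟩ | ⟨pre, suf, hdec, hpre, hsuf, _⟩
  · exact absurd h1 (by simp)
  -- the three scrutinees of A's match
  have hmaxv : PySem.List.max? ((PySem.Set.ofList s).map c) (fun x => x) = some (c m) := by
    rw [pvMax?_eq]
    have h2 := pvMap c (PySem.Set.ofList s) none
    simp only [Option.map_none] at h2
    rw [h2, hskip]
    rfl
  have hnotmem : c m ∉ pre.map c := by
    intro hmem
    obtain ⟨x, hx, heq⟩ := List.mem_map.mp hmem
    exact absurd heq (ne_of_lt (hpre x hx))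
  have hidx : PySem.List.index? ((PySem.Set.ofList s).map c) (c m) = some pre.length := by
    rw [PySem.List.index?_eq_some_iff]
    exact ⟨pre.map c, suf.map c, by simp [hdec], by simp, hnotmem⟩
  have hget : (PySem.List.pyGet? (PySem.Set.ofList s) ((pre.length : Nat) : Int)).getD 0 = m := by
    rw [PySem.List.pyGet?_natCast, hdec, List.getElem?_append_right (le_refl _)]
    simp
  rw [hvals, hkeys, hmaxv, hBmax]
  show (match PySem.List.index? (List.map c (PySem.Set.ofList s)) (c m) with
    | none => (0 : Int)
    | some i => (PySem.List.pyGet? (PySem.Set.ofList s) ((i : Nat) : Int)).getD 0) = m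
  rw [hidx]
  exact hget

-- ===== VERDICT (by name: the statement is the Claim_ definition above) =====
theorem moda_py_spec : Claim_equal_moda_py := by
  intro L left right _ hPre
  exact pvMain (PySem.List.slice L (some left) (some (right + 1))) _ (fun _ => rfl) hPre
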